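-- pv_equiv track=rewrite | github.com/byuawsfhtl/FlexibleDate | FlexibleDate/FlexibleDate.py | _getStringsAndInstances
-- ===== SOURCE A (Python) =====
-- def _getStringsAndInstances(stringList:list[str]) -> list[tuple[str, int]]:
--     """Gets the strings and instances.
--
--     Args:
--         strings (list): input string
--
--     Returns:
--         list[tuple[str, int]]: the list of strings and instances
--     """
--     countDict = {}
--     result = []
--     for string in stringList:
--         if countDict.get(string) is None:
--             countDict[string] = 0
--         countDict[string] += 1
--         result.append((string, countDict[string] - 1))
--     return result
-- ===== SOURCE B (Python) =====
-- def _getStringsAndInstances(stringList:list[str]) -> list[tuple[str, int]]: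
--     return [(string, stringList[:i].count(string)) for i, string in enumerate(stringList)]
-- ===== Notes on version B (the rewrite author's own statement) =====
-- stated objective: simpler
-- what changed: Replaces the single pass that maintains a running count dictionary with a one-line enumerate comprehension that recomputes each prior-occurrence count by scanning the prefix stringList[:i].
import Mathlib
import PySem

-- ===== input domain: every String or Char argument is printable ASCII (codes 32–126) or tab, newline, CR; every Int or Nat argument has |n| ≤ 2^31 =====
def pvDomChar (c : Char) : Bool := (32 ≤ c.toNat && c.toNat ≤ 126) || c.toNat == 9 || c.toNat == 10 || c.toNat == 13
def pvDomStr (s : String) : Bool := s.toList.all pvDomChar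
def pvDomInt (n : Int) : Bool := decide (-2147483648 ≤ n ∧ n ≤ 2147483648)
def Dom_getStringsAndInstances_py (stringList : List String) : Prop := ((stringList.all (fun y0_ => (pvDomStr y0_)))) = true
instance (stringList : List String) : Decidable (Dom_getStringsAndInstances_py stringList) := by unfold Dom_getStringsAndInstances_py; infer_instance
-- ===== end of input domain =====

-- B replaces A's running count-dictionary pass by an enumerate comprehension that counts each
-- string's occurrences in the prefix stringList[:i]; simpler (one line), not faster.


-- ===== PORT A =====
-- one loop iteration of A: default-initialise the key, increment, append (string, count-1)
def pvStepA (st : PySem.Dict String Int × List (String × Int)) (s : String) :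
    PySem.Dict String Int × List (String × Int) :=
  let d0 := if (st.1.get? s) = none then st.1.insert s 0 else st.1   -- if countDict.get(string) is None: countDict[string] = 0
  let d1 := d0.modify s 0 (· + 1)                                    -- countDict[string] += 1
  (d1, st.2 ++ [(s, d1.getD s 0 - 1)])                               -- result.append((string, countDict[string] - 1))

def getStringsAndInstances_py (stringList : List String) : List (String × Int) :=
  (stringList.foldl pvStepA (PySem.Dict.empty, [])).2

-- ===== PORT B =====
def getStringsAndInstances_py_alt (stringList : List String) : List (String × Int) :=
  (PySem.List.enumerate stringList).map
    (fun p => (p.2, ((PySem.List.slice stringList none (some p.1)).count p.2 : Int)))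

-- ===== PRECONDITION & SPEC =====
def Spec_getStringsAndInstances_py (stringList : List String) (out : List (String × Int)) : Prop := out = getStringsAndInstances_py_alt stringList
instance (stringList : List String) (out : List (String × Int)) : Decidable (Spec_getStringsAndInstances_py stringList out) := by unfold Spec_getStringsAndInstances_py; infer_instance

-- ===== CLAIM (what is proved, stated in full; the proofs are below) =====
def Claim_equal_getStringsAndInstances_py : Prop := ∀ (stringList : List String), Dom_getStringsAndInstances_py stringList → Spec_getStringsAndInstances_py stringList (getStringsAndInstances_py stringList)

-- ===== LEMMAS AND PROOFS =====

-- the common value: after prefix `pref`, the remainder `rest` contributes these pairs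
def pvG (pref : List String) : List String → List (String × Int)
  | [] => []
  | s :: rest => (s, (pref.count s : Int)) :: pvG (pref ++ [s]) rest

lemma pvD0 (d : PySem.Dict String Int) (s v : String) :
    (if (d.get? s) = none then d.insert s 0 else d).getD v 0 = d.getD v 0 := by
  split_ifs with h
  · by_cases hv : v = s
    · subst hv; simp [PySem.Dict.getD, PySem.Dict.get?_insert_self, h]
    · simp [PySem.Dict.getD, PySem.Dict.get?_insert_of_ne d 0 hv]
  · rfl

lemma pvStepA_dict_getD (d : PySem.Dict String Int) (s v : String) :
    ((if (d.get? s) = none then d.insert s 0 else d).modify s 0 (· + 1)).getD v 0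
      = if v = s then d.getD v 0 + 1 else d.getD v 0 := by
  rw [PySem.Dict.getD_modify]
  simp only [pvD0]
  by_cases hv : v = s <;> simp [hv]

lemma pvLoopA (rest : List String) :
    ∀ (d : PySem.Dict String Int) (acc : List (String × Int)) (pref : List String),
    (∀ v, d.getD v 0 = (pref.count v : Int)) →
    (rest.foldl pvStepA (d, acc)).2 = acc ++ pvG pref rest := by
  induction rest with
  | nil => intro d acc pref _; simp [pvG]
  | cons s rest ih =>
    intro d acc pref hinv
    have hstep : ∀ v, ((if (d.get? s) = none then d.insert s 0 else d).modify s 0 (· + 1)).getD v 0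
        = ((pref ++ [s]).count v : Int) := by
      intro v
      rw [pvStepA_dict_getD, List.count_append]
      by_cases hv : v = s
      · subst hv; simp [hinv v]
      · simp [hv, hinv v, Ne.symm hv]
    have hs : ((if (d.get? s) = none then d.insert s 0 else d).modify s 0 (· + 1)).getD s 0 - 1
        = (pref.count s : Int) := by rw [pvStepA_dict_getD]; simp [hinv s]
    have := ih ((if (d.get? s) = none then d.insert s 0 else d).modify s 0 (· + 1))
      (acc ++ [(s, ((if (d.get? s) = none then d.insert s 0 else d).modify s 0 (· + 1)).getD s 0 - 1)])
      (pref ++ [s]) hstep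
    simp only [List.foldl_cons]
    rw [show pvStepA (d, acc) s = _ from rfl] at *
    simp only [pvStepA] at this ⊢
    rw [this, pvG, hs]
    simp

lemma pvEnumG (rest : List String) :
    ∀ (pref : List String),
    (PySem.List.enumerate rest (pref.length : Int)).map
      (fun p => (p.2, ((PySem.List.slice (pref ++ rest) none (some p.1)).count p.2 : Int)))
      = pvG pref rest := by
  induction rest with
  | nil => intro pref; simp [PySem.List.enumerate_nil, pvG]
  | cons s rest ih =>
    intro pref
    have hsl : PySem.List.slice (pref ++ s :: rest) none (some ((pref.length : Int))) = pref := by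
      rw [PySem.List.slice_to_natCast]; simp
    have hfull : pref ++ s :: rest = (pref ++ [s]) ++ rest := by simp
    have hn : (pref.length : Int) + 1 = ((pref ++ [s]).length : Int) := by simp
    simp only [PySem.List.enumerate_cons, pvG, List.map_cons]
    congr 1
    · simp [hsl]
    · rw [hfull, hn, ih]

-- ===== VERDICT (by name: the statement is the Claim_ definition above) =====
theorem getStringsAndInstances_py_spec : Claim_equal_getStringsAndInstances_py := by
  intro xs _
  unfold Spec_getStringsAndInstances_py getStringsAndInstances_py getStringsAndInstances_py_alt
  have hA := pvLoopA xs PySem.Dict.empty [] [] (by intro v; simp [PySem.Dict.getD])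
  rw [hA, List.nil_append]
  have hB := pvEnumG xs []
  simpa using hB.symm
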